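-- pv_equiv track=rewrite | github.com/ScientiaCapital/epiphan-sales-agent | backend/app/services/langgraph/tools/qualification_tools.py | classify_vertical
-- ===== SOURCE A (Python) =====
-- def classify_vertical(
--     industry: str | None,
--     company: str | None,
--     inferred: str | None = None,
-- ) -> tuple[str, int, str]:
--     """
--     Classify industry vertical and return score.
--
--     Scoring (Weight: 20%):
--     - Higher Ed: 10 points
--     - Healthcare: 9 points
--     - Corporate: 8 points
--     - Broadcast/Media: 7 points
--     - Legal/Government: 6 points
--     - Other: 3 points
--
--     Args:
--         industry: Industry from enrichment data
--         company: Company name for keyword detection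
--         inferred: Inferred vertical if industry is None
--
--     Returns:
--         Tuple of (category, score, reason)
--     """
--     # Use inferred if industry is None
--     source_str = industry or inferred or ""
--     source_str_lower = source_str.lower() if source_str else ""
--     company_lower = (company or "").lower()
--
--     # Higher Ed detection
--     if any(
--         kw in source_str_lower
--         for kw in ["education", "higher ed", "university", "college", "academic"]
--     ) or any(
--         kw in company_lower for kw in ["university", "college", "school", "institute"]
--     ):
--         return (
--             "Higher Ed",
--             10,
--             f"Higher education vertical detected ({source_str or company})",
--         )
--
--     # Healthcare detection
--     if any(
--         kw in source_str_lower
--         for kw in ["healthcare", "health care", "medical", "hospital", "clinical"]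
--     ) or any(kw in company_lower for kw in ["hospital", "medical", "health", "clinic"]):
--         return (
--             "Healthcare",
--             9,
--             f"Healthcare vertical detected ({source_str or company})",
--         )
--
--     # Corporate/Enterprise detection
--     if any(
--         kw in source_str_lower
--         for kw in ["corporate", "enterprise", "business services", "financial"]
--     ):
--         return (
--             "Corporate",
--             8,
--             f"Corporate vertical detected ({source_str})",
--         )
--
--     # Broadcast/Media detection
--     if any(
--         kw in source_str_lower
--         for kw in ["broadcast", "media", "entertainment", "television", "streaming"]
--     ):
--         return (
--             "Broadcast",
--             7,
--             f"Broadcast/Media vertical detected ({source_str})",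
--         )
--
--     # Legal/Government detection
--     if any(
--         kw in source_str_lower for kw in ["legal", "law", "government", "public sector"]
--     ) or any(kw in company_lower for kw in ["court", "law firm", "government"]):
--         return (
--             "Legal/Government",
--             6,
--             f"Legal/Government vertical detected ({source_str or company})",
--         )
--
--     # Other/Unknown
--     if source_str:
--         return ("Other", 3, f"Non-core vertical: {source_str}")
--     return ("Other", 3, "Industry vertical unknown")
-- ===== SOURCE B (Python) =====
-- # Score-max classification: one flat keyword->score index per field, take the highest
-- # matched score (scores encode priority), then render from a score->category table.
-- _SOURCE_KW = {
--     "education": 10, "higher ed": 10, "university": 10, "college": 10, "academic": 10,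
--     "healthcare": 9, "health care": 9, "medical": 9, "hospital": 9, "clinical": 9,
--     "corporate": 8, "enterprise": 8, "business services": 8, "financial": 8,
--     "broadcast": 7, "media": 7, "entertainment": 7, "television": 7, "streaming": 7,
--     "legal": 6, "law": 6, "government": 6, "public sector": 6,
-- }
-- _COMPANY_KW = {
--     "university": 10, "college": 10, "school": 10, "institute": 10,
--     "hospital": 9, "medical": 9, "health": 9, "clinic": 9,
--     "court": 6, "law firm": 6, "government": 6,
-- }
-- _CATEGORY = {
--     10: ("Higher Ed", "Higher education"),
--     9: ("Healthcare", "Healthcare"),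
--     8: ("Corporate", "Corporate"),
--     7: ("Broadcast", "Broadcast/Media"),
--     6: ("Legal/Government", "Legal/Government"),
-- }
--
--
-- def classify_vertical(industry, company, inferred=None):
--     source_str = industry or inferred or ""
--     source_lower = source_str.lower()
--     company_lower = (company or "").lower()
--     best = 0
--     for kw, sc in _SOURCE_KW.items():
--         if kw in source_lower and sc > best:
--             best = sc
--     for kw, sc in _COMPANY_KW.items():
--         if kw in company_lower and sc > best:
--             best = sc
--     if best == 0:
--         if source_str:
--             return ("Other", 3, f"Non-core vertical: {source_str}")
--         return ("Other", 3, "Industry vertical unknown")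
--     category, prefix = _CATEGORY[best]
--     return (category, best,
--             f"{prefix} vertical detected ({source_str or company})")
-- ===== Notes on version B (the rewrite author's own statement) =====
-- stated objective: alternative
-- what changed: Replaces A's ordered cascade of five if-blocks (first match wins) by a max-score aggregation: two flat keyword->score dictionaries are scanned keeping the highest matched score (scores encode priority), then the result is rendered from a score->category table; correct because the five scores are distinct and ordered like A's branch order.
import Mathlib
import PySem

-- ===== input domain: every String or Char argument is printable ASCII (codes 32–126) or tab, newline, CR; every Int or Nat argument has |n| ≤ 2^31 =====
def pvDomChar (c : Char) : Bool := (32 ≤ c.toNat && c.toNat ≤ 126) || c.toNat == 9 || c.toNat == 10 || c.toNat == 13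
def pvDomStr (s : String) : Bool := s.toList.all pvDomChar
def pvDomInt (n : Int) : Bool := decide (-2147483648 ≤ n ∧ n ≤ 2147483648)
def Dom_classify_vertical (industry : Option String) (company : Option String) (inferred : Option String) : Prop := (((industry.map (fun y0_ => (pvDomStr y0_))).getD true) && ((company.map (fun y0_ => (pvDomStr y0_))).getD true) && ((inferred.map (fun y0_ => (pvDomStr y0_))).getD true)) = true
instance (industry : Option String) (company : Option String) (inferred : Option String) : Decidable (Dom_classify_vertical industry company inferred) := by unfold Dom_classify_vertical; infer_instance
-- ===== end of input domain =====

-- B replaces A's ordered cascade of keyword checks by a max-score aggregation over two flat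
-- keyword→score indexes (scores encode priority) plus a score→category table (objective: alternative).

-- ===== PORT A =====
-- Literal transliteration of A's cascade of keyword checks; ifs and returns in A's order.
def classify_vertical (industry : Option String) (company : Option String) (inferred : Option String) : String × Int × String :=
  let source_str : String :=
    match industry with
    | some s =>
        if s = "" then
          (match inferred with
           | some t => if t = "" then "" else t
           | none => "")
        else s
    | none =>
        (match inferred with
         | some t => if t = "" then "" else t
         | none => "")
  let source_str_lower : String := if source_str = "" then "" else PySem.Str.lower source_str
  let company_lower : String :=
    PySem.Str.lower (match company with | some c => if c = "" then "" else c | none => "")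
  -- Higher Ed detection
  if (["education", "higher ed", "university", "college", "academic"].any fun kw =>
        PySem.Str.isIn kw source_str_lower) ||
     (["university", "college", "school", "institute"].any fun kw =>
        PySem.Str.isIn kw company_lower) then
    ("Higher Ed", (10 : Int),
      "Higher education vertical detected (" ++
        (if source_str = "" then (match company with | some c => c | none => "None") else source_str) ++ ")")
  -- Healthcare detection
  else if (["healthcare", "health care", "medical", "hospital", "clinical"].any fun kw =>
        PySem.Str.isIn kw source_str_lower) ||
     (["hospital", "medical", "health", "clinic"].any fun kw =>
        PySem.Str.isIn kw company_lower) then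
    ("Healthcare", (9 : Int),
      "Healthcare vertical detected (" ++
        (if source_str = "" then (match company with | some c => c | none => "None") else source_str) ++ ")")
  -- Corporate/Enterprise detection
  else if (["corporate", "enterprise", "business services", "financial"].any fun kw =>
        PySem.Str.isIn kw source_str_lower) then
    ("Corporate", (8 : Int), "Corporate vertical detected (" ++ source_str ++ ")")
  -- Broadcast/Media detection
  else if (["broadcast", "media", "entertainment", "television", "streaming"].any fun kw =>
        PySem.Str.isIn kw source_str_lower) then
    ("Broadcast", (7 : Int), "Broadcast/Media vertical detected (" ++ source_str ++ ")")
  -- Legal/Government detection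
  else if (["legal", "law", "government", "public sector"].any fun kw =>
        PySem.Str.isIn kw source_str_lower) ||
     (["court", "law firm", "government"].any fun kw =>
        PySem.Str.isIn kw company_lower) then
    ("Legal/Government", (6 : Int),
      "Legal/Government vertical detected (" ++
        (if source_str = "" then (match company with | some c => c | none => "None") else source_str) ++ ")")
  -- Other/Unknown
  else if source_str ≠ "" then
    ("Other", (3 : Int), "Non-core vertical: " ++ source_str)
  else
    ("Other", (3 : Int), "Industry vertical unknown")

-- ===== PORT B =====
-- `x or y` on strings/None (truthiness of Python strings)
def pyOrStr (o : Option String) (d : String) : String :=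
  match o with
  | some s => if s = "" then d else s
  | none => d

-- Source B's flat keyword→score index for the source string (_SOURCE_KW, insertion order)
def pvSrcKw : List (String × Int) :=
  [("education", 10), ("higher ed", 10), ("university", 10), ("college", 10), ("academic", 10),
   ("healthcare", 9), ("health care", 9), ("medical", 9), ("hospital", 9), ("clinical", 9),
   ("corporate", 8), ("enterprise", 8), ("business services", 8), ("financial", 8),
   ("broadcast", 7), ("media", 7), ("entertainment", 7), ("television", 7), ("streaming", 7),
   ("legal", 6), ("law", 6), ("government", 6), ("public sector", 6)]

-- Source B's keyword→score index for the company name (_COMPANY_KW)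
def pvCoKw : List (String × Int) :=
  [("university", 10), ("college", 10), ("school", 10), ("institute", 10),
   ("hospital", 9), ("medical", 9), ("health", 9), ("clinic", 9),
   ("court", 6), ("law firm", 6), ("government", 6)]

-- Source B's score→(category, reason prefix) table (_CATEGORY)
def pvCategory : PySem.Dict Int (String × String) :=
  PySem.Dict.mk
    [(10, ("Higher Ed", "Higher education")),
     (9, ("Healthcare", "Healthcare")),
     (8, ("Corporate", "Corporate")),
     (7, ("Broadcast", "Broadcast/Media")),
     (6, ("Legal/Government", "Legal/Government"))]

-- one iteration of Source B's loops: `if kw in t and sc > best: best = sc`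
def pvStep (t : String) (b : Int) (p : String × Int) : Int :=
  if PySem.Str.isIn p.1 t ∧ b < p.2 then p.2 else b

def classify_vertical_alt (industry : Option String) (company : Option String) (inferred : Option String) : String × Int × String :=
  let source_str := pyOrStr industry (pyOrStr inferred "")
  let source_lower := PySem.Str.lower source_str
  let company_lower := PySem.Str.lower (pyOrStr company "")
  let best := pvCoKw.foldl (pvStep company_lower) (pvSrcKw.foldl (pvStep source_lower) 0)
  if best = 0 then
    if source_str ≠ "" then ("Other", 3, "Non-core vertical: " ++ source_str)
    else ("Other", 3, "Industry vertical unknown")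
  else
    -- _CATEGORY[best]: the key is always present when best ≠ 0 (best ∈ {6,7,8,9,10}), so the default is never used
    let info := (pvCategory.get? best).getD ("", "")
    (info.1, best,
      info.2 ++ " vertical detected (" ++
        (if source_str = "" then (match company with | some c => c | none => "None") else source_str) ++ ")")

-- ===== PRECONDITION & SPEC =====
def Spec_classify_vertical (industry : Option String) (company : Option String) (inferred : Option String) (out : String × Int × String) : Prop := out = classify_vertical_alt industry company inferred
instance (industry : Option String) (company : Option String) (inferred : Option String) (out : String × Int × String) : Decidable (Spec_classify_vertical industry company inferred out) := by unfold Spec_classify_vertical; infer_instance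

-- ===== CLAIM (what is proved, stated in full; the proofs are below) =====
def Claim_equal_classify_vertical : Prop := ∀ (industry : Option String) (company : Option String) (inferred : Option String), Dom_classify_vertical industry company inferred → Spec_classify_vertical industry company inferred (classify_vertical industry company inferred)

-- ===== LEMMAS AND PROOFS =====

-- a run of Source B's loop over a constant-score keyword group is "max with the score if any keyword matches"
lemma pvFold_group (t : String) (sc : Int) (ks : List String) (b : Int) :
    (ks.map (fun k => (k, sc))).foldl (pvStep t) b =
      if ks.any (fun k => PySem.Str.isIn k t) then max b sc else b := by
  induction ks generalizing b with
  | nil => simp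
  | cons k rest ih =>
      simp only [List.map_cons, List.foldl_cons, List.any_cons]
      by_cases hk : PySem.Str.isIn k t = true
      · by_cases hb : b < sc
        · rw [show pvStep t b (k, sc) = sc from if_pos ⟨hk, hb⟩, ih]
          simp only [hk, Bool.true_or, if_true]
          by_cases h : (rest.any fun k => PySem.Str.isIn k t) = true <;>
            · simp only [h, if_true]; omega
        · rw [show pvStep t b (k, sc) = b from if_neg (by tauto), ih,
              max_eq_left (by omega)]
          simp
      · rw [show pvStep t b (k, sc) = b from if_neg (by tauto), ih]
        simp only [Bool.not_eq_true] at hk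
        simp only [hk, Bool.false_or]

-- Source B's two loops compute the prioritized first-match score of A's cascade
lemma pvBest_char (sL cL : String) :
    pvCoKw.foldl (pvStep cL) (pvSrcKw.foldl (pvStep sL) 0) =
      (if (["education", "higher ed", "university", "college", "academic"].any fun kw =>
              PySem.Str.isIn kw sL) ||
          (["university", "college", "school", "institute"].any fun kw =>
              PySem.Str.isIn kw cL) then (10 : Int)
       else if (["healthcare", "health care", "medical", "hospital", "clinical"].any fun kw =>
              PySem.Str.isIn kw sL) ||
          (["hospital", "medical", "health", "clinic"].any fun kw =>
              PySem.Str.isIn kw cL) then 9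
       else if (["corporate", "enterprise", "business services", "financial"].any fun kw =>
              PySem.Str.isIn kw sL) then 8
       else if (["broadcast", "media", "entertainment", "television", "streaming"].any fun kw =>
              PySem.Str.isIn kw sL) then 7
       else if (["legal", "law", "government", "public sector"].any fun kw =>
              PySem.Str.isIn kw sL) ||
          (["court", "law firm", "government"].any fun kw =>
              PySem.Str.isIn kw cL) then 6
       else 0) := by
  have hsrc : pvSrcKw =
      (["education", "higher ed", "university", "college", "academic"].map (fun k => (k, (10 : Int)))) ++
      (["healthcare", "health care", "medical", "hospital", "clinical"].map (fun k => (k, (9 : Int)))) ++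
      (["corporate", "enterprise", "business services", "financial"].map (fun k => (k, (8 : Int)))) ++
      (["broadcast", "media", "entertainment", "television", "streaming"].map (fun k => (k, (7 : Int)))) ++
      (["legal", "law", "government", "public sector"].map (fun k => (k, (6 : Int)))) := rfl
  have hco : pvCoKw =
      (["university", "college", "school", "institute"].map (fun k => (k, (10 : Int)))) ++
      (["hospital", "medical", "health", "clinic"].map (fun k => (k, (9 : Int)))) ++
      (["court", "law firm", "government"].map (fun k => (k, (6 : Int)))) := rfl
  rw [hsrc, hco]
  simp only [List.foldl_append, pvFold_group]
  generalize (["education", "higher ed", "university", "college", "academic"].any fun kw =>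
      PySem.Str.isIn kw sL) = a10
  generalize (["healthcare", "health care", "medical", "hospital", "clinical"].any fun kw =>
      PySem.Str.isIn kw sL) = a9
  generalize (["corporate", "enterprise", "business services", "financial"].any fun kw =>
      PySem.Str.isIn kw sL) = a8
  generalize (["broadcast", "media", "entertainment", "television", "streaming"].any fun kw =>
      PySem.Str.isIn kw sL) = a7
  generalize (["legal", "law", "government", "public sector"].any fun kw =>
      PySem.Str.isIn kw sL) = a6
  generalize (["university", "college", "school", "institute"].any fun kw =>
      PySem.Str.isIn kw cL) = c10
  generalize (["hospital", "medical", "health", "clinic"].any fun kw =>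
      PySem.Str.isIn kw cL) = c9
  generalize (["court", "law firm", "government"].any fun kw =>
      PySem.Str.isIn kw cL) = c6
  cases a10 <;> cases a9 <;> cases a8 <;> cases a7 <;> cases a6 <;>
    cases c10 <;> cases c9 <;> cases c6 <;> decide

-- A's cascade body equals B's best-score dispatch, for any source string s and display string dc
lemma pvBody_eq (s c0 dc : String) :
    (if (["education", "higher ed", "university", "college", "academic"].any fun kw =>
           PySem.Str.isIn kw (if s = "" then "" else PySem.Str.lower s)) ||
        (["university", "college", "school", "institute"].any fun kw =>
           PySem.Str.isIn kw (PySem.Str.lower c0)) then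
       ("Higher Ed", (10 : Int),
         "Higher education vertical detected (" ++ (if s = "" then dc else s) ++ ")")
     else if (["healthcare", "health care", "medical", "hospital", "clinical"].any fun kw =>
           PySem.Str.isIn kw (if s = "" then "" else PySem.Str.lower s)) ||
        (["hospital", "medical", "health", "clinic"].any fun kw =>
           PySem.Str.isIn kw (PySem.Str.lower c0)) then
       ("Healthcare", (9 : Int),
         "Healthcare vertical detected (" ++ (if s = "" then dc else s) ++ ")")
     else if (["corporate", "enterprise", "business services", "financial"].any fun kw =>
           PySem.Str.isIn kw (if s = "" then "" else PySem.Str.lower s)) then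
       ("Corporate", (8 : Int), "Corporate vertical detected (" ++ s ++ ")")
     else if (["broadcast", "media", "entertainment", "television", "streaming"].any fun kw =>
           PySem.Str.isIn kw (if s = "" then "" else PySem.Str.lower s)) then
       ("Broadcast", (7 : Int), "Broadcast/Media vertical detected (" ++ s ++ ")")
     else if (["legal", "law", "government", "public sector"].any fun kw =>
           PySem.Str.isIn kw (if s = "" then "" else PySem.Str.lower s)) ||
        (["court", "law firm", "government"].any fun kw =>
           PySem.Str.isIn kw (PySem.Str.lower c0)) then
       ("Legal/Government", (6 : Int),
         "Legal/Government vertical detected (" ++ (if s = "" then dc else s) ++ ")")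
     else if s ≠ "" then
       ("Other", (3 : Int), "Non-core vertical: " ++ s)
     else
       ("Other", (3 : Int), "Industry vertical unknown")) =
    (let best := pvCoKw.foldl (pvStep (PySem.Str.lower c0)) (pvSrcKw.foldl (pvStep (PySem.Str.lower s)) 0)
     if best = 0 then
       if s ≠ "" then ("Other", 3, "Non-core vertical: " ++ s)
       else ("Other", 3, "Industry vertical unknown")
     else
       let info := (pvCategory.get? best).getD ("", "")
       (info.1, best,
         info.2 ++ " vertical detected (" ++ (if s = "" then dc else s) ++ ")")) := by
  have hlow : (if s = "" then "" else PySem.Str.lower s) = PySem.Str.lower s := by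
    by_cases h : s = ""
    · subst h; rfl
    · rw [if_neg h]
  rw [hlow]
  rw [pvBest_char (PySem.Str.lower s) (PySem.Str.lower c0)]
  by_cases hs : s = ""
  · -- empty source: every source-side keyword group is non-matching in ""
    subst hs
    have e1 : (["education", "higher ed", "university", "college", "academic"].any fun kw =>
        PySem.Str.isIn kw (PySem.Str.lower "")) = false := rfl
    have e2 : (["healthcare", "health care", "medical", "hospital", "clinical"].any fun kw =>
        PySem.Str.isIn kw (PySem.Str.lower "")) = false := rfl
    have e3 : (["corporate", "enterprise", "business services", "financial"].any fun kw =>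
        PySem.Str.isIn kw (PySem.Str.lower "")) = false := rfl
    have e4 : (["broadcast", "media", "entertainment", "television", "streaming"].any fun kw =>
        PySem.Str.isIn kw (PySem.Str.lower "")) = false := rfl
    have e5 : (["legal", "law", "government", "public sector"].any fun kw =>
        PySem.Str.isIn kw (PySem.Str.lower "")) = false := rfl
    simp only [e1, e2, e3, e4, e5, Bool.false_or]
    split_ifs <;> first | rfl | omega | simp_all
  · split_ifs <;> rfl

-- ===== VERDICT (by name: the statement is the Claim_ definition above) =====
set_option maxHeartbeats 1000000 in
theorem classify_vertical_spec : Claim_equal_classify_vertical := by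
  intro industry company inferred _
  show classify_vertical industry company inferred = classify_vertical_alt industry company inferred
  cases industry <;> cases inferred <;> cases company <;>
    (unfold classify_vertical classify_vertical_alt pyOrStr; exact pvBody_eq _ _ _)
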